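-- pv_equiv track=rewrite | github.com/Rishikauppalapati/mysecond-genAI-project | phase3/embeddings/vector_store.py | detect_fund
-- ===== SOURCE A (Python) =====
-- from typing import List, Dict, Any, Optional, Tuple
--
-- def detect_fund(query: str) -> Optional[str]:
--     """Detect which fund the query is about"""
--     funds = [
--         "Axis Large Cap Fund",
--         "Axis Small Cap Fund",
--         "Axis Nifty 500 Index Fund",
--         "Axis ELSS Tax Saver"
--     ]
--
--     query_lower = query.lower()
--
--     for fund in funds:
--         if fund.lower() in query_lower:
--             return fund
--
--     # Check for partial matches
--     if 'large cap' in query_lower: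
--         return "Axis Large Cap Fund"
--     elif 'small cap' in query_lower:
--         return "Axis Small Cap Fund"
--     elif 'nifty 500' in query_lower or 'nifty500' in query_lower:
--         return "Axis Nifty 500 Index Fund"
--     elif 'elss' in query_lower or 'tax saver' in query_lower:
--         return "Axis ELSS Tax Saver"
--
--     return None
-- ===== SOURCE B (Python) =====
-- _FUNDS = [
--     ("Axis Large Cap Fund", ("large cap",)),
--     ("Axis Small Cap Fund", ("small cap",)),
--     ("Axis Nifty 500 Index Fund", ("nifty 500", "nifty500")),
--     ("Axis ELSS Tax Saver", ("elss", "tax saver")),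
-- ]
--
-- def detect_fund(query):
--     q = query.lower()
--     best = None  # (tier, index, name); tier 0 = full name match, tier 1 = partial match
--     for idx, (name, partials) in enumerate(_FUNDS):
--         if name.lower() in q:
--             tier = 0
--         elif any(p in q for p in partials):
--             tier = 1
--         else:
--             continue
--         if best is None or (tier, idx) < (best[0], best[1]):
--             best = (tier, idx, name)
--     return best[2] if best is not None else None
-- ===== Notes on version B (the rewrite author's own statement) =====
-- stated objective: alternative
-- what changed: Replaces A's two staged scans (a loop over full fund names, then an if/elif chain of partial patterns) by a single pass over the four funds that classifies each as a tier-0 (full-name) or tier-1 (partial) match and keeps the lexicographically minimal (tier, index) in an accumulator.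
import Mathlib
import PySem

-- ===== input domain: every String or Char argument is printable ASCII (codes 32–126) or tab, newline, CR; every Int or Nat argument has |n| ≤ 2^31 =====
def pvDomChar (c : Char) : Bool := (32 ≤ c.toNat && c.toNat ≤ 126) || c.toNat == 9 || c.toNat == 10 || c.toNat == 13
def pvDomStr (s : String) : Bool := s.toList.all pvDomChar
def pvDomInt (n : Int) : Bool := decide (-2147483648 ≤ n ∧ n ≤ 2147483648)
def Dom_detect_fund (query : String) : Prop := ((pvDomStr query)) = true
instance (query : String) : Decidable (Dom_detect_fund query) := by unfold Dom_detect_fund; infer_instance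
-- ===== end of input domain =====

-- B replaces A's two staged scans (full-name loop, then an if/elif partial-pattern chain) by ONE
-- pass over the four funds keeping a best (tier, index, name) accumulator, tier 0 = full-name
-- match, tier 1 = partial match, minimal (tier, index) wins (objective: alternative decomposition).

-- ===== PORT A =====
-- the 'for fund in funds' loop of A
def detectFundLoop (funds : List String) (queryLower : String) : Option String :=
  match funds with
  | [] => none
  | f :: rest =>
      if PySem.Str.isIn (PySem.Str.lower f) queryLower then some f
      else detectFundLoop rest queryLower

def detect_fund (query : String) : Option String :=
  let funds : List String :=
    ["Axis Large Cap Fund", "Axis Small Cap Fund",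
     "Axis Nifty 500 Index Fund", "Axis ELSS Tax Saver"]
  let queryLower := PySem.Str.lower query
  match detectFundLoop funds queryLower with
  | some f => some f
  | none =>
      if PySem.Str.isIn "large cap" queryLower then some "Axis Large Cap Fund"
      else if PySem.Str.isIn "small cap" queryLower then some "Axis Small Cap Fund"
      else if PySem.Str.isIn "nifty 500" queryLower || PySem.Str.isIn "nifty500" queryLower then
        some "Axis Nifty 500 Index Fund"
      else if PySem.Str.isIn "elss" queryLower || PySem.Str.isIn "tax saver" queryLower then
        some "Axis ELSS Tax Saver"
      else none

-- ===== PORT B =====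
def fundsB : List (String × List String) :=
  [("Axis Large Cap Fund", ["large cap"]),
   ("Axis Small Cap Fund", ["small cap"]),
   ("Axis Nifty 500 Index Fund", ["nifty 500", "nifty500"]),
   ("Axis ELSS Tax Saver", ["elss", "tax saver"])]

-- 'if best is None or (tier, idx) < (best[0], best[1]): best = (tier, idx, name)'
def updateBest (best : Option (Int × Int × String)) (tier idx : Int) (name : String) :
    Option (Int × Int × String) :=
  match best with
  | none => some (tier, idx, name)
  | some b =>
      if tier < b.1 ∨ (tier = b.1 ∧ idx < b.2.1) then some (tier, idx, name) else best

-- one iteration of B's 'for idx, (name, partials) in enumerate(_FUNDS)' loop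
def stepB (q : String) (best : Option (Int × Int × String)) (p : Int × String × List String) :
    Option (Int × Int × String) :=
  if PySem.Str.isIn (PySem.Str.lower p.2.1) q then updateBest best 0 p.1 p.2.1
  else if p.2.2.any (fun s => PySem.Str.isIn s q) then updateBest best 1 p.1 p.2.1
  else best

def detect_fund_alt (query : String) : Option String :=
  let q := PySem.Str.lower query
  match (PySem.List.enumerate fundsB).foldl (stepB q) none with
  | some b => some b.2.2
  | none => none

-- ===== PRECONDITION & SPEC =====
def Spec_detect_fund (query : String) (out : Option String) : Prop := out = detect_fund_alt query
instance (query : String) (out : Option String) : Decidable (Spec_detect_fund query out) := by unfold Spec_detect_fund; infer_instance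

-- ===== CLAIM (what is proved, stated in full; the proofs are below) =====
def Claim_equal_detect_fund : Prop := ∀ (query : String), Dom_detect_fund query → Spec_detect_fund query (detect_fund query)

-- ===== LEMMAS AND PROOFS =====

-- ===== VERDICT (by name: the statement is the Claim_ definition above) =====
theorem detect_fund_spec : Claim_equal_detect_fund := by
  intro query _
  have h1 : PySem.Str.lower "Axis Large Cap Fund" = "axis large cap fund" := by decide
  have h2 : PySem.Str.lower "Axis Small Cap Fund" = "axis small cap fund" := by decide
  have h3 : PySem.Str.lower "Axis Nifty 500 Index Fund" = "axis nifty 500 index fund" := by decide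
  have h4 : PySem.Str.lower "Axis ELSS Tax Saver" = "axis elss tax saver" := by decide
  unfold Spec_detect_fund detect_fund detect_fund_alt
  simp only [detectFundLoop, fundsB, PySem.List.enumerate, List.foldl, stepB, updateBest,
    List.any, h1, h2, h3, h4]
  generalize PySem.Str.isIn "axis large cap fund" (PySem.Str.lower query) = a
  generalize PySem.Str.isIn "axis small cap fund" (PySem.Str.lower query) = b
  generalize PySem.Str.isIn "axis nifty 500 index fund" (PySem.Str.lower query) = c
  generalize PySem.Str.isIn "axis elss tax saver" (PySem.Str.lower query) = d
  generalize PySem.Str.isIn "large cap" (PySem.Str.lower query) = e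
  generalize PySem.Str.isIn "small cap" (PySem.Str.lower query) = f
  generalize PySem.Str.isIn "nifty 500" (PySem.Str.lower query) = g
  generalize PySem.Str.isIn "nifty500" (PySem.Str.lower query) = h
  generalize PySem.Str.isIn "elss" (PySem.Str.lower query) = i
  generalize PySem.Str.isIn "tax saver" (PySem.Str.lower query) = j
  revert a b c d e f g h i j
  decide
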